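-- pv_equiv track=rewrite | github.com/rschwa6308/Project-Euler | euler115/euler115.py | fill_count
-- ===== SOURCE A (Python) =====
-- import math
--
-- def partitions_restricted(n, k, I=1):
--     """partitions of n into parts of size >= k"""
--     if n < k: yield
--     yield (n,)
--     for i in range(max(I, k), n//2 + 1):
--         for p in partitions_restricted(n-i, i):
--             yield (i,) + p
--
-- def multiset_orderings(mset):
--     """number of ways to order the given multiset"""
--     repeats = []
--     for x in set(mset):
--         if (c := mset.count(x)) > 1:
--             repeats.append(c)
--
--     return math.factorial(len(mset)) // math.prod(math.factorial(r) for r in repeats)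
--
-- def fill_count(N, m):
--     RED_SIZES = []
--
--     for red_total in range(m, N+1):
--         for parts in partitions_restricted(red_total, m):
--             if red_total + len(parts) - 1 <= N:
--                 RED_SIZES.append(parts)
--
--     total = 0
--     for red_sizes in RED_SIZES:
--         reds = len(red_sizes)
--         grays = N - sum(red_sizes)
--
--         # how many ways to order the reds?
--         red_orderings = multiset_orderings(red_sizes)
--
--         # how many ways to distribute the grays?
--         grays -= reds - 1     # put one gray between each adjacent red
--         gray_distributions = math.comb(grays + reds, reds)
--
--         total += red_orderings * gray_distributions
--
--     return total + 1        # add 1 for all gray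
-- ===== SOURCE B (Python) =====
-- def fill_count(N, m):
--     # linear DP: f(n) = number of ways to fill a row of length n (red blocks of
--     # length >= m separated by at least one gray); f(n) = 1 for n < m and
--     # f(n) = f(n-1) + 1 + sum_{k=0}^{n-m-1} f(k) otherwise, with a running prefix
--     # sum; only the values f(m..N) are stored (f is constant 1 below m).
--     if N < m:
--         return 1
--     g = []              # g[i] = f(m + i)
--     S = 0               # sum_{k=0}^{n-m-1} f(k)
--     for n in range(m, N + 1):
--         prev = g[-1] if g else 1
--         g.append(prev + 1 + S)
--         k = n - m
--         S += g[k - m] if k >= m else 1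
--     return g[N - m]
-- ===== Notes on version B (the rewrite author's own statement) =====
-- stated objective: faster
-- what changed: replaces the exponential enumeration of restricted partitions (with multinomial ordering counts and binomial gap placements) by the linear one-pass DP f(n)=f(n-1)+1+sum_{k<=n-m-1}f(k) maintained with a running prefix sum
-- outside the precondition, e.g. on fill_count(5, -1): A returns 45, B raises IndexError; on fill_count(5, 0): A returns 38, B returns 233
import Mathlib
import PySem

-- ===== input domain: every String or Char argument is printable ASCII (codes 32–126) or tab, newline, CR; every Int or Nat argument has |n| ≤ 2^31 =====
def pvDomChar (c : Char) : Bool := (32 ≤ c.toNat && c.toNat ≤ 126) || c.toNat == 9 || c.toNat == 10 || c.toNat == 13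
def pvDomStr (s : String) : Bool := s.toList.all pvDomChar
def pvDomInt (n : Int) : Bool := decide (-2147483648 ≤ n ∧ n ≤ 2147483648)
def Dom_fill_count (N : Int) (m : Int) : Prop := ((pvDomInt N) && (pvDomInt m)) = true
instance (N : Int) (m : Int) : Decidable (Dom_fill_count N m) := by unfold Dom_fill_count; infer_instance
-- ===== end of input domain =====

-- B replaces A's exponential partition enumeration (+ multinomial ordering counts and
-- binomial gap counts) by the linear one-pass DP f(n) = f(n-1) + 1 + Σ_{k≤n-m-1} f(k)
-- maintained with a running prefix sum: an asymptotically faster exact re-implementation.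


-- ===== PORT A =====
-- math.factorial (A only applies it to nonnegative ints: lengths and counts)
def pvFact (n : Int) : Int := (n.toNat.factorial : Int)

-- math.comb(n, k); A only calls it with 0 ≤ k ≤ n + 1 and 0 ≤ n (guarded by the
-- 'red_total + len(parts) - 1 <= N' filter), where Nat.choose of the toNats is exact
def pvComb (n k : Int) : Int := (n.toNat.choose k.toNat : Int)

-- helper for the termination argument of partsR, stated before it so the port can cite it
theorem pv_partsR_dec {n k i : Int}
    (hi : i ∈ PySem.List.pyRange (max 1 k) (PySem.Int.floordiv n 2 + 1)) :
    (n - i).toNat < n.toNat := by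
  rcases PySem.List.mem_pyRange_one.mp hi with ⟨h1, h2⟩
  have hfd : PySem.Int.floordiv n 2 = n / 2 :=
    PySem.Int.floordiv_eq_ediv_of_pos (by norm_num)
  rw [hfd] at h2
  omega

-- partitions_restricted(n, k) (the generator, collected into the list of all its yields,
-- in yield order; fill_count always calls it with n ≥ k, so the 'if n < k: yield' branch
-- — a bare None that would crash the caller — is unreachable and not represented)
def partsR (n : Int) (k : Int) : List (List Int) :=
  [n] :: (PySem.List.pyRange (max 1 k) (PySem.Int.floordiv n 2 + 1)).attach.flatMap
    (fun x => (partsR (n - x.1) x.1).map (fun p => x.1 :: p))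
termination_by n.toNat
decreasing_by exact pv_partsR_dec x.2

-- multiset_orderings
def msoP (mset : List Int) : Int :=
  let repeats : List Int := (PySem.Set.ofList mset).foldl
      (fun acc x => if 1 < mset.count x then acc ++ [(mset.count x : Int)] else acc) []
  PySem.Int.floordiv (pvFact (mset.length : Int))
    (repeats.foldl (fun a r => a * pvFact r) 1)

def fill_count (N : Int) (m : Int) : Int :=
  let RED_SIZES : List (List Int) :=
    (PySem.List.pyRange m (N + 1)).foldl (fun acc red_total =>
      (partsR red_total m).foldl (fun acc parts =>
        if red_total + parts.length - 1 ≤ N then acc ++ [parts] else acc) acc) []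
  let total : Int := RED_SIZES.foldl (fun total red_sizes =>
    let reds : Int := red_sizes.length
    let grays : Int := N - red_sizes.sum
    let red_orderings := msoP red_sizes
    let grays := grays - (reds - 1)
    let gray_distributions := pvComb (grays + reds) reds
    total + red_orderings * gray_distributions) 0
  total + 1

-- ===== PORT B =====
-- one pass, state (g, S): g[i] = f(m+i) (f is constant 1 below m and is not stored),
-- S is the prefix sum Σ_{k ≤ n-m} f(k)
-- (the 0-defaults of pyGetD are never consulted under Pre_: every index is in range)
def fill_count_alt (N : Int) (m : Int) : Int :=
  if N < m then 1
  else
    let st := (PySem.List.pyRange m (N + 1)).foldl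
      (fun (st : List Int × Int) n =>
        let prev := if st.1.isEmpty then 1 else PySem.List.pyGetD st.1 (-1) 0
        let g := st.1 ++ [prev + 1 + st.2]
        let k := n - m
        (g, st.2 + (if m ≤ k then PySem.List.pyGetD g (k - m) 0 else 1)))
      ([], 0)
    PySem.List.pyGetD st.1 (N - m) 0

-- ===== PRECONDITION & SPEC =====
-- Pre_ restricts to the natural domain of the task, a positive minimum block length
-- (plus the trivial N < m inputs, where both programs return 1): for m ≤ 0 with N ≥ m
-- A still returns a value — its enumerator counts a spurious single "block" of
-- nonpositive length — while B's compact DP raises IndexError (or, at m = 0,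
-- counts blocks of length ≥ 1 placed without separating grays) there.
def Pre_fill_count (N : Int) (m : Int) : Prop := 1 ≤ m ∨ N < m
instance (N : Int) (m : Int) : Decidable (Pre_fill_count N m) := by unfold Pre_fill_count; infer_instance
def pvWitness_fill_count : Int × Int := (7, 2)

def Spec_fill_count (N : Int) (m : Int) (out : Int) : Prop := out = fill_count_alt N m
instance (N : Int) (m : Int) (out : Int) : Decidable (Spec_fill_count N m out) := by unfold Spec_fill_count; infer_instance

-- ===== CLAIM (what is proved, stated in full; the proofs are below) =====
def Claim_equal_fill_count : Prop := ∀ (N : Int) (m : Int), Dom_fill_count N m → Pre_fill_count N m → Spec_fill_count N m (fill_count N m)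

-- ===== LEMMAS AND PROOFS =====

theorem pv_pyRange_eq_nil {a b : Int} (h : b ≤ a) : PySem.List.pyRange a b = [] := by
  rw [List.eq_nil_iff_forall_not_mem]
  intro x hx
  have := PySem.List.mem_pyRange_one.mp hx
  omega

theorem pv_pyRange_nodup (a b : Int) : (PySem.List.pyRange a b).Nodup := by
  have h : ∀ (t : Nat) (a b : Int), (b - a).toNat ≤ t → (PySem.List.pyRange a b).Nodup := by
    intro t
    induction t with
    | zero => intro a b h
              rw [pv_pyRange_eq_nil (by omega)]; exact List.nodup_nil
    | succ t ih =>
        intro a b h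
        by_cases hab : a < b
        · rw [PySem.List.pyRange_one_cons hab]
          refine List.nodup_cons.mpr ⟨?_, ih (a+1) b (by omega)⟩
          intro hmem
          have := PySem.List.mem_pyRange_one.mp hmem
          omega
        · rw [pv_pyRange_eq_nil (by omega)]; exact List.nodup_nil
  exact h _ a b le_rfl

theorem partsR_eq (n k : Int) :
    partsR n k = [n] :: (PySem.List.pyRange (max 1 k) (PySem.Int.floordiv n 2 + 1)).flatMap
      (fun i => (partsR (n - i) i).map (fun p => i :: p)) := by
  rw [partsR]
  congr 1
  conv_rhs => rw [← List.attach_map_subtype_val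
    (l := PySem.List.pyRange (max 1 k) (PySem.Int.floordiv n 2 + 1)), List.flatMap_map]

theorem pv_le_sum {a : Int} {q : List Int} (ha : 0 < a) (hq : q ≠ []) (h : ∀ x ∈ q, a ≤ x) :
    a ≤ q.sum := by
  cases q with
  | nil => exact absurd rfl hq
  | cons y rest =>
      have h1 : a ≤ y := h y (by simp)
      have h2 : (0:Int) ≤ rest.sum :=
        List.sum_nonneg (fun x hx => le_trans (by omega) (h x (by simp [hx])))
      simp only [List.sum_cons]; omega

theorem mem_partsR : ∀ (t : Nat) (n k : Int), n.toNat ≤ t → 1 ≤ k → k ≤ n → ∀ p : List Int,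
    (p ∈ partsR n k ↔ p ≠ [] ∧ p.sum = n ∧ p.Pairwise (· ≤ ·) ∧ ∀ x ∈ p, k ≤ x) := by
  intro t
  induction t with
  | zero => intro n k ht hk hn; omega
  | succ t ih =>
      intro n k ht hk hn p
      rw [partsR_eq]
      simp only [List.mem_cons, List.mem_flatMap, List.mem_map]
      constructor
      · rintro (rfl | ⟨i, hi, q, hq, rfl⟩)
        · refine ⟨by simp, by simp, by simp, by simp [hn]⟩
        · rcases PySem.List.mem_pyRange_one.mp hi with ⟨h1, h2⟩
          rw [PySem.Int.floordiv_eq_ediv_of_pos (by norm_num)] at h2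
          have hi1 : 1 ≤ i := le_trans (le_max_left 1 k) h1
          have hik : k ≤ i := le_trans (le_max_right 1 k) h1
          have hin : i ≤ n - i := by omega
          have := (ih (n - i) i (by omega) hi1 hin q).mp hq
          rcases this with ⟨hq0, hqs, hqp, hqk⟩
          refine ⟨by simp, by simp [hqs], ?_, ?_⟩
          · exact List.pairwise_cons.mpr ⟨fun x hx => le_trans (le_refl i) (hqk x hx), hqp⟩
          · intro x hx
            rcases List.mem_cons.mp hx with rfl | hx
            · exact hik
            · exact le_trans hik (hqk x hx)
      · rintro ⟨hp0, hps, hpp, hpk⟩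
        cases p with
        | nil => exact absurd rfl hp0
        | cons a q =>
            rcases List.pairwise_cons.mp hpp with ⟨haq, hqp⟩
            have hak : k ≤ a := hpk a (by simp)
            cases q with
            | nil => left; simp only [List.sum_cons, List.sum_nil, add_zero] at hps; simp [hps]
            | cons y rest =>
                right
                have hq0 : (y :: rest) ≠ [] := by simp
                have hsum : a ≤ (y :: rest).sum := pv_le_sum (by omega) hq0 haq
                have hqs : (y :: rest).sum = n - a := by
                  simp only [List.sum_cons] at hps ⊢; omega
                have h2a : 2 * a ≤ n := by omega
                refine ⟨a, ?_, y :: rest, ?_, rfl⟩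
                · rw [PySem.List.mem_pyRange_one, PySem.Int.floordiv_eq_ediv_of_pos (by norm_num)]
                  constructor
                  · exact max_le (by omega) hak
                  · omega
                · refine ((ih (n - a) a (by omega) (by omega) (by omega) _).mpr
                    ⟨hq0, hqs, hqp, haq⟩)

theorem partsR_nodup : ∀ (t : Nat) (n k : Int), n.toNat ≤ t → 1 ≤ k → k ≤ n →
    (partsR n k).Nodup := by
  intro t
  induction t with
  | zero => intro n k ht hk hn; omega
  | succ t ih =>
      intro n k ht hk hn
      rw [partsR_eq]
      refine List.nodup_cons.mpr ⟨?_, ?_⟩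
      · intro hmem
        rcases List.mem_flatMap.mp hmem with ⟨i, hi, hp⟩
        rcases List.mem_map.mp hp with ⟨q, hq, hcons⟩
        rcases PySem.List.mem_pyRange_one.mp hi with ⟨h1, h2⟩
        rw [PySem.Int.floordiv_eq_ediv_of_pos (by norm_num)] at h2
        have hi1 : 1 ≤ i := le_trans (le_max_left 1 k) h1
        have hq0 : q ≠ [] :=
          ((mem_partsR t (n - i) i (by omega) hi1 (by omega) q).mp hq).1
        cases q with
        | nil => exact absurd rfl hq0
        | cons y rest => simp at hcons
      · rw [List.nodup_flatMap]
        constructor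
        · intro i hi
          rcases PySem.List.mem_pyRange_one.mp hi with ⟨h1, h2⟩
          rw [PySem.Int.floordiv_eq_ediv_of_pos (by norm_num)] at h2
          have hi1 : 1 ≤ i := le_trans (le_max_left 1 k) h1
          exact (ih (n - i) i (by omega) hi1 (by omega)).map
            (fun p q h => by injection h)
        · have hnd := pv_pyRange_nodup (max 1 k) (PySem.Int.floordiv n 2 + 1)
          refine List.Pairwise.imp_of_mem ?_ hnd
          intro i j hi hj hij
          intro p hp1 hp2
          rcases List.mem_map.mp hp1 with ⟨q1, _, h1⟩
          rcases List.mem_map.mp hp2 with ⟨q2, _, h2⟩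
          rw [← h1] at h2
          injection h2 with h2a
          exact hij h2a.symm

-- ===== multiset orderings =====
def msoN (l : List Int) : ℕ := Nat.multinomial l.toFinset l.count


-- msoP computes ↑(msoN): the Python formula len!/(∏ factorials of repeated counts)
-- is the multinomial coefficient
theorem pv_prod_filter_ones (s : List Int) (p : Int → Bool) (f : Int → ℕ)
    (h : ∀ x ∈ s, p x = false → f x = 1) :
    ((s.filter p).map f).prod = (s.map f).prod := by
  induction s with
  | nil => rfl
  | cons a t ih =>
      have ht : ∀ x ∈ t, p x = false → f x = 1 := fun x hx => h x (List.mem_cons_of_mem a hx)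
      cases hpa : p a with
      | true => simp [List.filter_cons, hpa, ih ht]
      | false => simp [List.filter_cons, hpa, ih ht, h a (List.mem_cons_self) hpa]

theorem msoP_eq (l : List Int) : msoP l = (msoN l : Int) := by
  unfold msoP msoN
  simp only [PySem.List.foldl_append_ite, List.nil_append]
  have hfold : ∀ (s : List Int) (a : ℕ),
      List.foldl (fun a r => a * pvFact r) ((a : ℕ) : Int)
          (s.map (fun x => ((l.count x : ℕ) : Int)))
        = ((s.foldl (fun a x => a * (l.count x).factorial) a : ℕ) : Int) := by
    intro s
    induction s with
    | nil => intro a; simp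
    | cons x t iht =>
        intro a
        simp only [List.map_cons, List.foldl_cons]
        have hh : ((a : ℕ) : Int) * pvFact ((l.count x : ℕ) : Int)
            = (((a * (l.count x).factorial) : ℕ) : Int) := by
          simp [pvFact]
        rw [hh, iht]
  rw [show (1 : Int) = ((1 : ℕ) : Int) by norm_num, hfold _ 1]
  have hprod : (List.filter (fun x => decide (1 < l.count x)) (PySem.Set.ofList l)).foldl
        (fun a x => a * (l.count x).factorial) 1
      = ∏ x ∈ l.toFinset, (l.count x).factorial := by
    rw [← List.foldl_map (f := fun x => (l.count x).factorial) (g := (· * ·)), ← List.prod_eq_foldl,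
      pv_prod_filter_ones _ _ _ ?ones]
    case ones =>
      intro x hx hpx
      have hx1 : x ∈ l := (PySem.Set.mem_ofList l x).mp hx
      have hc1 : l.count x = 1 := by
        have := List.count_pos_iff.mpr hx1
        simp only [decide_eq_false_iff_not, not_lt] at hpx
        omega
      simp [hc1]
    have hset : (PySem.Set.ofList l).toFinset = l.toFinset := by
      apply Finset.ext
      intro x
      simp [List.mem_toFinset, PySem.Set.mem_ofList]
    rw [← hset, List.prod_toFinset _ (PySem.Set.nodup_ofList l)]
  rw [hprod, pvFact, Int.toNat_natCast, PySem.Int.floordiv_natCast]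
  congr 1
  have hspec := Nat.multinomial_spec l.toFinset l.count
  rw [List.sum_toFinset_count_eq_length] at hspec
  have hpos : 0 < ∏ x ∈ l.toFinset, (l.count x).factorial :=
    Finset.prod_pos (fun x _ => Nat.factorial_pos _)
  rw [← hspec, Nat.mul_div_cancel_left _ hpos]

-- extending the index set of a multinomial by zero-count elements does not change it
theorem pv_multinomial_ext {s t : Finset Int} (f : Int → ℕ) (hst : s ⊆ t)
    (h0 : ∀ x ∈ t, x ∉ s → f x = 0) : Nat.multinomial t f = Nat.multinomial s f := by
  show (∑ i ∈ t, f i).factorial / ∏ i ∈ t, (f i).factorial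
      = (∑ i ∈ s, f i).factorial / ∏ i ∈ s, (f i).factorial
  rw [Finset.sum_subset hst h0, Finset.prod_subset hst (fun x hx hxs => by simp [h0 x hx hxs])]

-- the ordering-count recurrence: removing one copy of each distinct value
theorem mso_erase (l : List Int) (hl : l ≠ []) :
    ∑ x ∈ l.toFinset, msoN (l.erase x) = msoN l := by
  have hpos : 0 < ∏ y ∈ l.toFinset, (l.count y).factorial :=
    Finset.prod_pos (fun y _ => Nat.factorial_pos _)
  apply Nat.eq_of_mul_eq_mul_right hpos
  have hstep : ∀ x ∈ l.toFinset,
      msoN (l.erase x) * ∏ y ∈ l.toFinset, (l.count y).factorial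
        = (l.length - 1).factorial * l.count x := by
    intro x hx
    have hxl : x ∈ l := List.mem_toFinset.mp hx
    have hcx : 1 ≤ l.count x := List.count_pos_iff.mpr hxl
    -- msoN over the full index set
    have h1 : msoN (l.erase x) = Nat.multinomial l.toFinset (l.erase x).count := by
      unfold msoN
      exact (pv_multinomial_ext _ (fun y hy => List.mem_toFinset.mpr
          (List.mem_of_mem_erase (List.mem_toFinset.mp hy)))
        (fun y _ hy => List.count_eq_zero.mpr (fun hmem => hy (List.mem_toFinset.mpr hmem)))).symm
    -- product split
    have h2 : (∏ y ∈ l.toFinset, (l.count y).factorial)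
        = (∏ y ∈ l.toFinset, ((l.erase x).count y).factorial) * l.count x := by
      rw [← Finset.mul_prod_erase l.toFinset _ hx, ← Finset.mul_prod_erase l.toFinset _ hx]
      have hers : ∏ y ∈ l.toFinset.erase x, ((l.erase x).count y).factorial
          = ∏ y ∈ l.toFinset.erase x, (l.count y).factorial := by
        apply Finset.prod_congr rfl
        intro y hy
        rw [List.count_erase_of_ne (Finset.ne_of_mem_erase hy)]
      rw [hers, List.count_erase_self, ← Nat.mul_factorial_pred (by omega : l.count x ≠ 0)]
      ring
    -- sum of erased counts
    have h3 : (∑ y ∈ l.toFinset, (l.erase x).count y) = l.length - 1 := by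
      have hsub : (l.erase x).toFinset ⊆ l.toFinset :=
        fun y hy => List.mem_toFinset.mpr (List.mem_of_mem_erase (List.mem_toFinset.mp hy))
      rw [← Finset.sum_subset hsub (fun y _ hy => List.count_eq_zero.mpr
          (fun hmem => hy (List.mem_toFinset.mpr hmem)))]
      rw [List.sum_toFinset_count_eq_length, List.length_erase, if_pos hxl]
    have hspec := Nat.multinomial_spec l.toFinset (l.erase x).count
    rw [h3] at hspec
    rw [h1, h2, ← mul_assoc, mul_comm (Nat.multinomial l.toFinset (l.erase x).count) _,
      hspec]
  rw [Finset.sum_mul, Finset.sum_congr rfl hstep, ← Finset.mul_sum,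
    List.sum_toFinset_count_eq_length]
  have hr : 1 ≤ l.length := List.length_pos_iff.mpr hl
  unfold msoN
  rw [mul_comm (Nat.multinomial _ _) _, Nat.multinomial_spec, List.sum_toFinset_count_eq_length]
  rw [← Nat.mul_factorial_pred (by omega : l.length ≠ 0)]
  ring

-- ===== the A-side double sum =====
def termA (N : Int) (p : List Int) : ℕ := msoN p * ((N - p.sum + 1).toNat.choose p.length)

def TA (N m : Int) : ℕ := ((PySem.List.pyRange m (N + 1)).map
  (fun s => ((partsR s m).map (termA N)).sum)).sum

theorem pv_sum_filter_cast (L : List (List Int)) (cond : List Int → Bool)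
    (g : List Int → Int) (t : List Int → ℕ)
    (hg : ∀ p ∈ L, cond p = true → g p = (t p : Int))
    (h0 : ∀ p ∈ L, cond p = false → t p = 0) :
    ((L.filter cond).map g).sum = (((L.map t).sum : ℕ) : Int) := by
  induction L with
  | nil => rfl
  | cons a l ih =>
      have hgl : ∀ p ∈ l, cond p = true → g p = (t p : Int) :=
        fun p hp => hg p (List.mem_cons_of_mem a hp)
      have h0l : ∀ p ∈ l, cond p = false → t p = 0 :=
        fun p hp => h0 p (List.mem_cons_of_mem a hp)
      cases hca : cond a with
      | true =>
          simp only [List.filter_cons, hca, if_pos, List.map_cons, List.sum_cons,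
            ih hgl h0l, hg a (List.mem_cons_self) hca]
          push_cast
          ring
      | false =>
          rw [List.filter_cons_of_neg (by simp [hca]), ih hgl h0l, List.map_cons,
            List.sum_cons, h0 a (List.mem_cons_self) hca, Nat.cast_add]
          simp

theorem pv_sum_flatMap {α β : Type} [AddCommMonoid β] (l : List α) (h : α → List β) :
    (l.flatMap h).sum = (l.map (fun a => (h a).sum)).sum := by
  rw [List.flatMap, List.sum_flatten, List.map_map]; rfl

theorem pv_cast_sum (L : List Int) (f : Int → ℕ) :
    (L.map (fun s => ((f s : ℕ) : Int))).sum = (((L.map f).sum : ℕ) : Int) := by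
  induction L with
  | nil => rfl
  | cons a l ih => simp [ih]

theorem fill_count_eq (N m : Int) (hm : 1 ≤ m) : fill_count N m = (TA N m : Int) + 1 := by
  unfold fill_count
  simp only []
  congr 1
  -- RED_SIZES as a flatMap of filters
  have hinner : ∀ (acc : List (List Int)) (s : Int),
      (partsR s m).foldl (fun acc parts =>
        if s + (parts.length : Int) - 1 ≤ N then acc ++ [parts] else acc) acc
      = acc ++ (partsR s m).filter (fun parts => decide (s + (parts.length : Int) - 1 ≤ N)) :=
    fun acc s => PySem.List.foldl_append_ite_eq_filter
      (fun parts => s + (parts.length : Int) - 1 ≤ N) (partsR s m) acc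
  have houter := PySem.List.foldl_congr_mem (PySem.List.pyRange m (N + 1)) _
      (fun acc s => acc ++ (partsR s m).filter
        (fun parts => decide (s + (parts.length : Int) - 1 ≤ N))) []
      (fun acc x _ => hinner acc x)
  rw [houter, PySem.List.foldl_append_eq_flatMap, List.nil_append]
  rw [PySem.List.foldl_add]
  rw [zero_add, List.map_flatMap]
  unfold TA
  rw [pv_sum_flatMap]
  -- pointwise over s
  have hmain : ∀ s ∈ PySem.List.pyRange m (N + 1),
      (((partsR s m).filter (fun parts => decide (s + (parts.length : Int) - 1 ≤ N))).map
        (fun red_sizes => msoP red_sizes * pvComb (N - red_sizes.sum - ((red_sizes.length : Int) - 1) + (red_sizes.length : Int)) (red_sizes.length : Int))).sum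
      = ((((partsR s m).map (termA N)).sum : ℕ) : Int) := by
    intro s hs
    rcases PySem.List.mem_pyRange_one.mp hs with ⟨hs1, hs2⟩
    apply pv_sum_filter_cast
    · intro p hp hc
      have hprop := (mem_partsR s.toNat s m (le_refl _) hm hs1 p).mp hp
      rcases hprop with ⟨hp0, hps, _, _⟩
      have hlen : 1 ≤ p.length := List.length_pos_iff.mpr hp0
      have hcond : s + (p.length : Int) - 1 ≤ N := of_decide_eq_true hc
      unfold termA
      rw [msoP_eq]
      have harg : N - p.sum - ((p.length : Int) - 1) + (p.length : Int) = N - p.sum + 1 := by ring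
      rw [harg, pvComb, hps]
      have htn : ((p.length : Int)).toNat = p.length := Int.toNat_natCast _
      rw [htn]
      push_cast
      ring
    · intro p hp hc
      have hprop := (mem_partsR s.toNat s m (le_refl _) hm hs1 p).mp hp
      rcases hprop with ⟨hp0, hps, _, _⟩
      have hlen : 1 ≤ p.length := List.length_pos_iff.mpr hp0
      have hcond : ¬ (s + (p.length : Int) - 1 ≤ N) := of_decide_eq_false hc
      unfold termA
      rw [hps]
      have : (N - s + 1).toNat < p.length := by omega
      rw [Nat.choose_eq_zero_of_lt this, Nat.mul_zero]
  rw [List.map_congr_left (fun s hs => hmain s hs), pv_cast_sum]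

def termB (N : Int) (p : List Int) : ℕ := msoN p * ((N - p.sum).toNat.choose (p.length - 1))

def SB (N m : Int) : ℕ := ((PySem.List.pyRange m (N + 1)).map
  (fun s => ((partsR s m).map (termB N)).sum)).sum

-- Pascal step: TA N = TA (N-1) + SB N  (for 1 ≤ m ≤ N)
theorem pv_step1 (N m : Int) (hm : 1 ≤ m) (hN : m ≤ N) :
    TA N m = TA (N - 1) m + SB N m := by
  unfold TA SB
  have hpt : ∀ s ∈ PySem.List.pyRange m (N + 1),
      ((partsR s m).map (termA N)).sum
        = ((partsR s m).map (termA (N - 1))).sum + ((partsR s m).map (termB N)).sum := by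
    intro s hs
    rcases PySem.List.mem_pyRange_one.mp hs with ⟨hs1, hs2⟩
    rw [← List.sum_map_add]
    apply congrArg
    apply List.map_congr_left
    intro p hp
    rcases (mem_partsR s.toNat s m (le_refl _) hm hs1 p).mp hp with ⟨hp0, hps, _, _⟩
    have hlen : 1 ≤ p.length := List.length_pos_iff.mpr hp0
    unfold termA termB
    rw [hps]
    have h1 : (N - s + 1).toNat = (N - s).toNat + 1 := by omega
    have h2 : ((N - 1) - s + 1).toNat = (N - s).toNat := by omega
    rw [h1, h2]
    have h3 : p.length = (p.length - 1) + 1 := by omega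
    rw [h3, Nat.choose_succ_succ ((N - s).toNat) (p.length - 1)]
    have h4 : p.length - 1 + 1 - 1 = p.length - 1 := by omega
    rw [h4]
    ring
  rw [List.map_congr_left hpt, List.sum_map_add]
  congr 1
  -- drop the s = N term of the (N-1)-sum
  rw [PySem.List.pyRange_one_succ_right (by omega : m ≤ N)]
  have hN1 : PySem.List.pyRange m ((N - 1) + 1) = PySem.List.pyRange m N := by norm_num
  rw [hN1, List.map_append, List.sum_append]
  have hzero : ((partsR N m).map (termA (N - 1))).sum = 0 := by
    apply List.sum_eq_zero
    intro t ht
    rcases List.mem_map.mp ht with ⟨p, hp, rfl⟩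
    rcases (mem_partsR N.toNat N m (le_refl _) hm (by omega) p).mp hp with ⟨hp0, hps, _, _⟩
    have hlen : 1 ≤ p.length := List.length_pos_iff.mpr hp0
    unfold termA
    rw [hps]
    have : ((N - 1) - N + 1).toNat = 0 := by omega
    rw [this, Nat.choose_eq_zero_of_lt (by omega)]
    ring
  simp [hzero]

-- the pair machinery for the re-indexing (partition, removed value) ↔ (value, remainder)
def fF (N : Int) (xq : Int × List Int) : ℕ :=
  msoN xq.2 * ((N - xq.1 - xq.2.sum).toNat.choose xq.2.length)

def PairsL (N m : Int) : List (Int × List Int) :=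
  (PySem.List.pyRange m (N + 1)).flatMap (fun s =>
    (partsR s m).flatMap (fun p => p.dedup.map (fun x => (x, p.erase x))))

def PairsR (N m : Int) : List (Int × List Int) :=
  (PySem.List.pyRange m (N + 1)).flatMap (fun x =>
    (([] : List Int) :: (PySem.List.pyRange m (N - x + 1)).flatMap (fun u => partsR u m)).map
      (fun q => (x, q)))

theorem pv_sum_erase {x : Int} {p : List Int} (hx : x ∈ p) :
    p.sum = x + (p.erase x).sum := by
  rw [(List.perm_cons_erase hx).sum_eq, List.sum_cons]

theorem pv_orderedInsert_of_le (a : Int) (t : List Int) (h : ∀ y ∈ t, a ≤ y) :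
    t.orderedInsert (· ≤ ·) a = a :: t := by
  cases t with
  | nil => rfl
  | cons b r => simp [List.orderedInsert, h b (List.mem_cons_self)]

theorem pv_orderedInsert_erase (x : Int) : ∀ (q : List Int),
    (q.orderedInsert (· ≤ ·) x).erase x = q := by
  intro q
  induction q with
  | nil => simp [List.orderedInsert]
  | cons a t ih =>
      by_cases h : x ≤ a
      · simp [List.orderedInsert, h]
      · simp only [List.orderedInsert, if_neg h]
        rw [List.erase_cons_tail (by simp; omega), ih]

theorem pv_erase_orderedInsert : ∀ (p : List Int), p.Pairwise (· ≤ ·) → ∀ x ∈ p,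
    (p.erase x).orderedInsert (· ≤ ·) x = p := by
  intro p
  induction p with
  | nil => simp
  | cons a t ih =>
      intro hp x hx
      rcases List.pairwise_cons.mp hp with ⟨hat, ht⟩
      by_cases hxa : x = a
      · subst hxa
        rw [List.erase_cons_head]
        exact pv_orderedInsert_of_le x t hat
      · have hxt : x ∈ t := by
          rcases List.mem_cons.mp hx with h | h
          · exact absurd h hxa
          · exact h
        rw [List.erase_cons_tail (by simp; exact fun h => hxa h.symm)]
        have hax : a ≤ x := hat x hxt
        have hnxa : ¬ x ≤ a := by omega
        simp only [List.orderedInsert, if_neg hnxa]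
        rw [ih ht x hxt]

theorem pv_dedup_toFinset (p : List Int) : p.dedup.toFinset = p.toFinset := by
  apply Finset.ext
  intro y
  simp [List.mem_toFinset, List.mem_dedup]

-- Step 2: SB as a sum over the (value, remainder) pairs
theorem pv_SB_pairs (N m : Int) (hm : 1 ≤ m) :
    SB N m = ((PairsL N m).map (fF N)).sum := by
  unfold SB PairsL
  rw [List.map_flatMap, pv_sum_flatMap]
  apply congrArg
  apply List.map_congr_left
  intro s hs
  rcases PySem.List.mem_pyRange_one.mp hs with ⟨hs1, hs2⟩
  rw [List.map_flatMap, pv_sum_flatMap]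
  apply congrArg
  apply List.map_congr_left
  intro p hp
  rcases (mem_partsR s.toNat s m (le_refl _) hm hs1 p).mp hp with ⟨hp0, hps, hpsort, hpge⟩
  unfold termB
  rw [← mso_erase p hp0, Finset.sum_mul, ← pv_dedup_toFinset,
    List.sum_toFinset _ (List.nodup_dedup p), List.map_map]
  apply congrArg
  apply List.map_congr_left
  intro x hx
  have hxp : x ∈ p := (List.mem_dedup.mp hx)
  show msoN (p.erase x) * ((N - p.sum).toNat.choose (p.length - 1)) = fF N (x, p.erase x)
  unfold fF
  rw [List.length_erase, if_pos hxp]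
  have : N - x - (p.erase x).sum = N - p.sum := by
    have := pv_sum_erase hxp
    omega
  rw [this]

theorem pv_sum_nonneg_of_ge {m : Int} (hm : 1 ≤ m) {q : List Int} (h : ∀ y ∈ q, m ≤ y) :
    0 ≤ q.sum :=
  List.sum_nonneg (fun y hy => le_trans (by omega) (h y hy))

theorem pv_mem_PairsL (N m : Int) (hm : 1 ≤ m) (xq : Int × List Int) :
    xq ∈ PairsL N m ↔ m ≤ xq.1 ∧ xq.1 + xq.2.sum ≤ N ∧ xq.2.Pairwise (· ≤ ·) ∧
      ∀ y ∈ xq.2, m ≤ y := by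
  obtain ⟨x, q⟩ := xq
  unfold PairsL
  simp only [List.mem_flatMap, List.mem_map]
  constructor
  · rintro ⟨s, hs, p, hp, y, hy, hpair⟩
    rcases PySem.List.mem_pyRange_one.mp hs with ⟨hs1, hs2⟩
    rcases (mem_partsR s.toNat s m (le_refl _) hm hs1 p).mp hp with ⟨hp0, hps, hpsort, hpge⟩
    obtain ⟨rfl, rfl⟩ : x = y ∧ q = p.erase y := by
      constructor <;> [exact (congrArg Prod.fst hpair).symm; exact (congrArg Prod.snd hpair).symm]
    have hyp : x ∈ p := List.mem_dedup.mp hy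
    refine ⟨hpge x hyp, ?_, ?_, ?_⟩
    · rw [← pv_sum_erase hyp, hps]; omega
    · exact List.Pairwise.sublist (List.erase_sublist) hpsort
    · exact fun z hz => hpge z (List.mem_of_mem_erase hz)
  · rintro ⟨hx, hsum, hqsort, hqge⟩
    have hq0 : (0:Int) ≤ q.sum := pv_sum_nonneg_of_ge hm hqge
    refine ⟨x + q.sum, ?_, q.orderedInsert (· ≤ ·) x, ?_, x, ?_, ?_⟩
    · rw [PySem.List.mem_pyRange_one]; omega
    · apply (mem_partsR (x + q.sum).toNat (x + q.sum) m (le_refl _) hm (by omega) _).mpr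
      refine ⟨?_, ?_, ?_, ?_⟩
      · have := List.orderedInsert_length (· ≤ ·) q x
        intro hnil
        rw [hnil] at this
        simp at this
      · rw [(List.perm_orderedInsert _ x q).sum_eq, List.sum_cons]
      · exact List.Pairwise.orderedInsert x q hqsort
      · intro z hz
        rcases (List.mem_orderedInsert _).mp hz with rfl | hz
        · exact hx
        · exact hqge z hz
    · exact List.mem_dedup.mpr ((List.mem_orderedInsert _).mpr (Or.inl rfl))
    · rw [pv_orderedInsert_erase]

theorem pv_mem_PairsR (N m : Int) (hm : 1 ≤ m) (xq : Int × List Int) :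
    xq ∈ PairsR N m ↔ m ≤ xq.1 ∧ xq.1 + xq.2.sum ≤ N ∧ xq.2.Pairwise (· ≤ ·) ∧
      ∀ y ∈ xq.2, m ≤ y := by
  obtain ⟨x, q⟩ := xq
  unfold PairsR
  simp only [List.mem_flatMap, List.mem_map, List.mem_cons]
  constructor
  · rintro ⟨x', hx', q', hq', hpair⟩
    obtain ⟨rfl, rfl⟩ : x = x' ∧ q = q' := by
      constructor <;> [exact (congrArg Prod.fst hpair).symm; exact (congrArg Prod.snd hpair).symm]
    rcases PySem.List.mem_pyRange_one.mp hx' with ⟨hx1, hx2⟩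
    rcases hq' with rfl | hq'
    · exact ⟨hx1, by simp; omega, by simp, by simp⟩
    · rcases hq' with ⟨u, hu, hqu⟩
      rcases PySem.List.mem_pyRange_one.mp hu with ⟨hu1, hu2⟩
      rcases (mem_partsR u.toNat u m (le_refl _) hm hu1 q).mp hqu with ⟨hq0, hqs, hqsort, hqge⟩
      exact ⟨hx1, by omega, hqsort, hqge⟩
  · rintro ⟨hx, hsum, hqsort, hqge⟩
    have hq0 : (0:Int) ≤ q.sum := pv_sum_nonneg_of_ge hm hqge
    refine ⟨x, PySem.List.mem_pyRange_one.mpr ⟨hx, by omega⟩, q, ?_, rfl⟩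
    cases hqe : q with
    | nil => exact Or.inl rfl
    | cons a t =>
        right
        rw [← hqe]
        have hqne : q ≠ [] := by rw [hqe]; simp
        have hsm : m ≤ q.sum := pv_le_sum (by omega) hqne hqge
        refine ⟨q.sum, PySem.List.mem_pyRange_one.mpr ⟨hsm, by omega⟩, ?_⟩
        exact (mem_partsR q.sum.toNat q.sum m (le_refl _) hm hsm q).mpr ⟨hqne, rfl, hqsort, hqge⟩

theorem pv_nodup_PairsL (N m : Int) (hm : 1 ≤ m) : (PairsL N m).Nodup := by
  unfold PairsL
  rw [List.nodup_flatMap]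
  constructor
  · intro s hs
    rcases PySem.List.mem_pyRange_one.mp hs with ⟨hs1, hs2⟩
    rw [List.nodup_flatMap]
    constructor
    · intro p hp
      exact (List.nodup_dedup p).map (fun a b h => congrArg Prod.fst h)
    · have hnd := partsR_nodup s.toNat s m (le_refl _) hm hs1
      refine List.Pairwise.imp_of_mem ?_ hnd
      intro p1 p2 hp1 hp2 hne xq h1 h2
      rcases List.mem_map.mp h1 with ⟨x1, hx1, he1⟩
      rcases List.mem_map.mp h2 with ⟨x2, hx2, he2⟩
      rcases (mem_partsR s.toNat s m (le_refl _) hm hs1 p1).mp hp1 with ⟨_, _, hs1p, _⟩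
      rcases (mem_partsR s.toNat s m (le_refl _) hm hs1 p2).mp hp2 with ⟨_, _, hs2p, _⟩
      have hx : x1 = x2 := by
        have := (congrArg Prod.fst he1).trans (congrArg Prod.fst he2).symm
        simpa using this
      subst hx
      have hq : p1.erase x1 = p2.erase x1 := by
        have := (congrArg Prod.snd he1).trans (congrArg Prod.snd he2).symm
        simpa using this
      apply hne
      rw [← pv_erase_orderedInsert p1 hs1p x1 (List.mem_dedup.mp hx1),
        ← pv_erase_orderedInsert p2 hs2p x1 (List.mem_dedup.mp hx2), hq]
  · refine List.Pairwise.imp_of_mem ?_ (pv_pyRange_nodup m (N + 1))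
    intro s1 s2 hmem1 hmem2 hne xq h1 h2
    rcases PySem.List.mem_pyRange_one.mp hmem1 with ⟨ha1, _⟩
    rcases PySem.List.mem_pyRange_one.mp hmem2 with ⟨ha2, _⟩
    rcases List.mem_flatMap.mp h1 with ⟨p1, hp1, hx1⟩
    rcases List.mem_flatMap.mp h2 with ⟨p2, hp2, hx2⟩
    rcases List.mem_map.mp hx1 with ⟨y1, hy1, he1⟩
    rcases List.mem_map.mp hx2 with ⟨y2, hy2, he2⟩
    rcases (mem_partsR s1.toNat s1 m (le_refl _) hm ha1 p1).mp hp1 with ⟨_, hps1, _, _⟩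
    rcases (mem_partsR s2.toNat s2 m (le_refl _) hm ha2 p2).mp hp2 with ⟨_, hps2, _, _⟩
    apply hne
    have e1 : xq.1 + xq.2.sum = s1 := by
      rw [← he1]
      simp only []
      rw [← pv_sum_erase (List.mem_dedup.mp hy1), hps1]
    have e2 : xq.1 + xq.2.sum = s2 := by
      rw [← he2]
      simp only []
      rw [← pv_sum_erase (List.mem_dedup.mp hy2), hps2]
    omega

theorem pv_nodup_PairsR (N m : Int) (hm : 1 ≤ m) : (PairsR N m).Nodup := by
  unfold PairsR
  rw [List.nodup_flatMap]
  constructor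
  · intro x hx
    rcases PySem.List.mem_pyRange_one.mp hx with ⟨hx1, _⟩
    apply List.Nodup.map (fun a b h => congrArg Prod.snd h)
    rw [List.nodup_cons]
    constructor
    · intro hmem
      rcases List.mem_flatMap.mp hmem with ⟨u, hu, hqu⟩
      rcases PySem.List.mem_pyRange_one.mp hu with ⟨hu1, _⟩
      exact ((mem_partsR u.toNat u m (le_refl _) hm hu1 _).mp hqu).1 rfl
    · rw [List.nodup_flatMap]
      constructor
      · intro u hu
        rcases PySem.List.mem_pyRange_one.mp hu with ⟨hu1, _⟩
        exact partsR_nodup u.toNat u m (le_refl _) hm hu1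
      · refine List.Pairwise.imp_of_mem ?_ (pv_pyRange_nodup m (N - x + 1))
        intro u1 u2 hm1 hm2 hne q h1 h2
        rcases PySem.List.mem_pyRange_one.mp hm1 with ⟨hb1, _⟩
        rcases PySem.List.mem_pyRange_one.mp hm2 with ⟨hb2, _⟩
        apply hne
        have e1 := ((mem_partsR u1.toNat u1 m (le_refl _) hm hb1 q).mp h1).2.1
        have e2 := ((mem_partsR u2.toNat u2 m (le_refl _) hm hb2 q).mp h2).2.1
        omega
  · refine List.Pairwise.imp_of_mem ?_ (pv_pyRange_nodup m (N + 1))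
    intro x1 x2 _ _ hne xq h1 h2
    rcases List.mem_map.mp h1 with ⟨q1, _, he1⟩
    rcases List.mem_map.mp h2 with ⟨q2, _, he2⟩
    apply hne
    have e1 : xq.1 = x1 := by rw [← he1]
    have e2 : xq.1 = x2 := by rw [← he2]
    omega

theorem pv_pairs_perm (N m : Int) (hm : 1 ≤ m) : (PairsL N m).Perm (PairsR N m) := by
  rw [List.perm_ext_iff_of_nodup (pv_nodup_PairsL N m hm) (pv_nodup_PairsR N m hm)]
  intro xq
  rw [pv_mem_PairsL N m hm xq, pv_mem_PairsR N m hm xq]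

theorem pv_list_range_sum (c : ℕ) (f : ℕ → ℕ) :
    ((List.range c).map f).sum = ∑ i ∈ Finset.range c, f i := by
  induction c with
  | zero => rfl
  | succ c ih => rw [List.range_succ, List.map_append, List.sum_append,
      Finset.sum_range_succ, ih]; simp

theorem pv_range_sum_reflect (g : Int → ℕ) (n : Int) :
    ((PySem.List.pyRange 0 n).map (fun k => g (n - 1 - k))).sum
      = ((PySem.List.pyRange 0 n).map g).sum := by
  by_cases hn : n ≤ 0
  · rw [pv_pyRange_eq_nil hn]; rfl
  · have hc : n = ((n.toNat : ℕ) : Int) := by omega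
    rw [hc, PySem.List.pyRange_zero_natCast, List.map_map, List.map_map]
    have h1 : ∀ k ∈ List.range n.toNat,
        ((fun k => g (((n.toNat : ℕ) : Int) - 1 - k)) ∘ (fun k : ℕ => (k : Int))) k
          = (fun j : ℕ => g ((n.toNat - 1 - j : ℕ) : Int)) k := by
      intro k hk
      have hk' : k < n.toNat := List.mem_range.mp hk
      simp only [Function.comp_apply]
      congr 1
      omega
    rw [List.map_congr_left h1]
    have h2 : List.map (g ∘ fun k : ℕ => (k : Int)) (List.range n.toNat)
        = List.map (fun j : ℕ => g (j : Int)) (List.range n.toNat) := rfl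
    rw [h2, pv_list_range_sum, pv_list_range_sum]
    exact Finset.sum_range_reflect (fun j : ℕ => g (j : Int)) n.toNat

theorem pv_pyRange_shift : ∀ (t : ℕ) (a b : Int), (b - a).toNat = t →
    PySem.List.pyRange a b = (PySem.List.pyRange 0 (b - a)).map (fun k => a + k) := by
  intro t
  induction t with
  | zero =>
      intro a b h
      rw [pv_pyRange_eq_nil (by omega), pv_pyRange_eq_nil (by omega : b - a ≤ 0)]
      rfl
  | succ t ih =>
      intro a b h
      have hab : a < b := by omega
      rw [PySem.List.pyRange_one_cons hab, PySem.List.pyRange_one_cons (by omega : (0:Int) < b - a)]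
      rw [List.map_cons, add_zero]
      congr 1
      rw [ih (a + 1) b (by omega)]
      rw [show (0:Int) + 1 = 1 by ring, ih 1 (b - a) (by omega), List.map_map]
      rw [show b - a - 1 = b - (a + 1) by ring]
      apply List.map_congr_left
      intro k _
      simp only [Function.comp_apply]
      ring

theorem pv_PairsR_sum (N m : Int) (hm : 1 ≤ m) :
    ((PairsR N m).map (fF N)).sum
      = ((PySem.List.pyRange m (N + 1)).map (fun x => 1 + TA (N - x - 1) m)).sum := by
  unfold PairsR
  rw [List.map_flatMap, pv_sum_flatMap]
  apply congrArg
  apply List.map_congr_left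
  intro x hx
  rcases PySem.List.mem_pyRange_one.mp hx with ⟨hx1, hx2⟩
  rw [List.map_map]
  simp only [Function.comp_def]
  rw [List.map_cons, List.sum_cons]
  congr 1
  · show fF N (x, ([] : List Int)) = 1
    unfold fF
    simp [msoN]
  · rw [List.map_flatMap, pv_sum_flatMap]
    unfold TA
    rw [show N - x - 1 + 1 = N - x by ring]
    have hterm : ∀ u ∈ PySem.List.pyRange m (N - x),
        ((partsR u m).map (fun q => fF N (x, q))).sum
          = ((partsR u m).map (termA (N - x - 1))).sum := by
      intro u hu
      apply congrArg
      apply List.map_congr_left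
      intro q _
      unfold fF termA
      rw [show N - x - 1 - q.sum + 1 = N - x - q.sum by ring]
    by_cases hc : m ≤ N - x
    · rw [PySem.List.pyRange_one_succ_right hc, List.map_append, List.sum_append]
      have hzero : ((partsR (N - x) m).map (fun q => fF N (x, q))).sum = 0 := by
        apply List.sum_eq_zero
        intro t ht
        rcases List.mem_map.mp ht with ⟨q, hq, rfl⟩
        rcases (mem_partsR (N - x).toNat (N - x) m (le_refl _) hm hc q).mp hq with
          ⟨hq0, hqs, _, _⟩
        have hlen : 1 ≤ q.length := List.length_pos_iff.mpr hq0
        unfold fF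
        rw [hqs]
        have h0 : (N - x - (N - x)).toNat = 0 := by omega
        rw [h0, Nat.choose_eq_zero_of_lt (show 0 < q.length by omega)]
        ring
      simp only [List.map_cons, List.map_nil, List.sum_cons, List.sum_nil]
      rw [hzero, List.map_congr_left hterm]
      simp
    · rw [pv_pyRange_eq_nil (by omega), pv_pyRange_eq_nil (by omega : N - x ≤ m)]
      rfl

theorem pv_TA_neg (m : Int) (hm : 1 ≤ m) : TA (-1) m = 0 := by
  unfold TA
  rw [show (-1 : Int) + 1 = 0 by ring, pv_pyRange_eq_nil (by omega)]
  rfl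

theorem pv_SB_eval (N m : Int) (hm : 1 ≤ m) (hN : m ≤ N) :
    SB N m = 1 + ((PySem.List.pyRange 0 (N - m)).map (fun k => TA k m + 1)).sum := by
  rw [pv_SB_pairs N m hm, ((pv_pairs_perm N m hm).map (fF N)).sum_eq, pv_PairsR_sum N m hm]
  rw [PySem.List.pyRange_one_succ_right (by omega : m ≤ N), List.map_append, List.sum_append]
  simp only [List.map_cons, List.map_nil, List.sum_cons, List.sum_nil]
  rw [show N - N - 1 = -1 by ring, pv_TA_neg m hm]
  have hshift := pv_pyRange_shift (N - m).toNat m N rfl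
  rw [hshift, List.map_map]
  have hrefl := pv_range_sum_reflect (fun k => 1 + TA k m) (N - m)
  have hcong : ∀ k ∈ PySem.List.pyRange 0 (N - m),
      ((fun x => 1 + TA (N - x - 1) m) ∘ (fun k => m + k)) k
        = (fun k => 1 + TA ((N - m) - 1 - k) m) k := by
    intro k _
    simp only [Function.comp_apply]
    rw [show N - (m + k) - 1 = N - m - 1 - k by ring]
  rw [List.map_congr_left hcong, hrefl]
  have : ∀ k ∈ PySem.List.pyRange 0 (N - m), 1 + TA k m = TA k m + 1 := by
    intro k _; omega
  rw [List.map_congr_left this]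
  omega

theorem pv_KEY (N m : Int) (hm : 1 ≤ m) (hN : m ≤ N) :
    TA N m = TA (N - 1) m + 1 + ((PySem.List.pyRange 0 (N - m)).map (fun k => TA k m + 1)).sum := by
  rw [pv_step1 N m hm hN, pv_SB_eval N m hm hN]
  omega

-- ===== the B side =====
def Gm (m k : Int) : Int := (TA k m : Int) + 1

def SI (m : Int) (c : ℕ) : Int := ((List.range c).map (fun (j : ℕ) => Gm m (j : Int))).sum

theorem pv_pyGetD_neg_one {α : Type} (l : List α) (d : α) (h : l ≠ []) :
    PySem.List.pyGetD l (-1) d = l.getD (l.length - 1) d := by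
  have hl : 1 ≤ l.length := List.length_pos_iff.mpr h
  simp only [PySem.List.pyGetD, PySem.List.pyGet?, PySem.List.pyIdx?]
  rw [if_neg (by omega), if_pos (by omega)]
  simp [List.getD]

theorem pv_SI_cast (m : Int) (hm : 1 ≤ m) (c : ℕ) :
    SI m c = (((PySem.List.pyRange 0 (c : Int)).map (fun k => TA k m + 1)).sum : ℕ) := by
  unfold SI
  rw [PySem.List.pyRange_zero_natCast, List.map_map]
  induction c with
  | zero => rfl
  | succ c ih =>
      rw [List.range_succ, List.map_append, List.map_append, List.sum_append, List.sum_append, ih]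
      simp only [List.map_cons, List.map_nil, List.sum_cons, List.sum_nil, Function.comp_apply]
      unfold Gm
      push_cast
      ring

theorem pv_alt_invariant (N m : Int) (hm : 1 ≤ m) : ∀ (t : ℕ), (m + t ≤ N + 1) →
    (PySem.List.pyRange m (m + (t : Int))).foldl
      (fun (st : List Int × Int) n =>
        let prev := if st.1.isEmpty then 1 else PySem.List.pyGetD st.1 (-1) 0
        let g := st.1 ++ [prev + 1 + st.2]
        let k := n - m
        (g, st.2 + (if m ≤ k then PySem.List.pyGetD g (k - m) 0 else 1)))
      ([], 0)
    = ((List.range t).map (fun (i : ℕ) => Gm m (m + (i : Int))), SI m t) := by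
  intro t
  induction t with
  | zero =>
      intro _
      rw [pv_pyRange_eq_nil (by omega), List.foldl_nil]
      rfl
  | succ t ih =>
      intro ht
      rw [show m + ((t + 1 : ℕ) : Int) = (m + (t : Int)) + 1 by push_cast; ring,
        PySem.List.pyRange_one_succ_right (by omega), List.foldl_append, ih (by omega)]
      simp only [List.foldl_cons, List.foldl_nil]
      have hGm1 : ∀ (c : ℕ), ((c : Int) < m) → Gm m (c : Int) = 1 := by
        intro c hc
        unfold Gm TA
        rw [pv_pyRange_eq_nil (by omega)]
        rfl
      have hlen : ((List.range t).map (fun (i : ℕ) => Gm m (m + (i : Int)))).length = t := by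
        simp
      have hprev : (if ((List.range t).map (fun (i : ℕ) => Gm m (m + (i : Int)))).isEmpty
            then (1 : Int)
            else PySem.List.pyGetD ((List.range t).map (fun (i : ℕ) => Gm m (m + (i : Int)))) (-1) 0)
          = Gm m (m + (t : Int) - 1) := by
        cases t with
        | zero =>
            rw [if_pos (by rfl)]
            have : m + ((0 : ℕ) : Int) - 1 = ((m - 1).toNat : Int) := by omega
            rw [this, hGm1 (m - 1).toNat (by omega)]
        | succ u =>
            have hne : ((List.range (u + 1)).map (fun (i : ℕ) => Gm m (m + (i : Int)))) ≠ [] := by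
              intro hcon
              have := congrArg List.length hcon
              rw [hlen] at this
              simp at this
            rw [if_neg (by simpa [List.isEmpty_iff] using hne),
              pv_pyGetD_neg_one _ _ hne, hlen,
              PySem.List.getD_map_range _ _ _ _ (by omega)]
            congr 1
            push_cast
            ring
      have hkey : Gm m (m + (t : Int) - 1) + 1 + SI m t = Gm m (m + (t : Int)) := by
        unfold Gm
        have hK := pv_KEY (m + (t : Int)) m hm (by omega)
        rw [pv_SI_cast m hm t]
        rw [hK, show m + (t : Int) - m = (t : Int) by ring]
        push_cast
        ring
      have happ : (List.range t).map (fun (i : ℕ) => Gm m (m + (i : Int)))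
            ++ [Gm m (m + (t : Int))]
          = (List.range (t + 1)).map (fun (i : ℕ) => Gm m (m + (i : Int))) := by
        rw [List.range_succ, List.map_append, List.map_cons, List.map_nil]
      simp only [hprev, hkey, happ]
      simp only [Prod.mk.injEq]
      refine ⟨trivial, ?_⟩
      rw [show m + (t : Int) - m = ((t : ℕ) : Int) by ring]
      have hSstep : SI m (t + 1) = SI m t + Gm m ((t : ℕ) : Int) := by
        unfold SI
        rw [List.range_succ, List.map_append, List.sum_append, List.map_cons,
          List.map_nil, List.sum_cons, List.sum_nil]
        ring
      by_cases hc : m ≤ ((t : ℕ) : Int)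
      · rw [if_pos hc, PySem.List.pyGetD_of_nonneg _ _ (by omega),
          PySem.List.getD_map_range _ _ _ _ (by omega), hSstep]
        congr 2
        omega
      · rw [if_neg hc, hSstep, hGm1 t (by omega)]

theorem alt_eq (N m : Int) (hm : 1 ≤ m) (hN : m ≤ N) :
    fill_count_alt N m = (TA N m : Int) + 1 := by
  unfold fill_count_alt
  rw [if_neg (by omega)]
  simp only []
  have ht : N + 1 = m + (((N + 1 - m).toNat : ℕ) : Int) := by omega
  rw [ht, pv_alt_invariant N m hm (N + 1 - m).toNat (by omega)]
  simp only []
  rw [PySem.List.pyGetD_of_nonneg _ _ (by omega),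
    PySem.List.getD_map_range _ _ _ _ (by omega),
    show m + (((N - m).toNat : ℕ) : Int) = N by omega]
  unfold Gm
  rfl

theorem pv_fill_count_trivial (N m : Int) (hN : N < m) : fill_count N m = 1 := by
  unfold fill_count
  simp only []
  rw [pv_pyRange_eq_nil (by omega), List.foldl_nil, List.foldl_nil]
  ring

-- ===== VERDICT (by name: the statement is the Claim_ definition above) =====
theorem fill_count_spec : Claim_equal_fill_count := by
  unfold Claim_equal_fill_count Spec_fill_count
  intro N m _ hpre
  by_cases hN : N < m
  · rw [pv_fill_count_trivial N m hN]
    unfold fill_count_alt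
    rw [if_pos hN]
  · have hm : 1 ≤ m := by
      rcases hpre with h | h
      · exact h
      · exact absurd h hN
    rw [fill_count_eq N m hm, alt_eq N m hm (by omega)]
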